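-- pv_equiv track=rewrite | github.com/pypi-data/pypi-mirror-395 | packages/blindai-guard/blindai_guard-0.1.0.tar.gz/blindai_guard-0.1.0/src/blind_ai/core/detection/patterns/validators.py | validate_medicare_id
-- ===== SOURCE A (Python) =====
-- def validate_medicare_id(medicare_id: str) -> bool:
--     """Validate new Medicare ID format (MBI).
--
--     New Medicare Beneficiary Identifier (MBI) format (2018+):
--     - 11 characters
--     - Positions 1, 4, 7, 10: Numeric (1-9)
--     - Positions 2, 5, 8, 11: Alphabetic (excludes S, L, O, I, B, Z)
--     - Positions 3, 6, 9: Alphanumeric (excludes S, L, O, I, B, Z)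
--
--     Args:
--         medicare_id: Medicare Beneficiary Identifier
--
--     Returns:
--         True if format matches MBI pattern, False otherwise
--
--     Example:
--         >>> validate_medicare_id("1EG4-TE5-MK73")
--         True
--         >>> validate_medicare_id("1SG4-TE5-MK73")  # S is excluded
--         False
--     """
--     # Remove non-alphanumeric characters
--     mbi_clean = "".join(c for c in medicare_id.upper() if c.isalnum())
--
--     if len(mbi_clean) != 11:
--         return False
--
--     # Characters to exclude
--     excluded = set("SLOIBZ")
--
--     # Position 1: Numeric 1-9
--     if not mbi_clean[0].isdigit() or mbi_clean[0] == "0":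
--         return False
--
--     # Position 2: Alpha (excluded chars)
--     if not mbi_clean[1].isalpha() or mbi_clean[1] in excluded:
--         return False
--
--     # Position 3: Alphanumeric (excluded chars)
--     if not mbi_clean[2].isalnum() or mbi_clean[2] in excluded:
--         return False
--
--     # Position 4: Numeric 0-9
--     if not mbi_clean[3].isdigit():
--         return False
--
--     # Position 5: Alpha (excluded chars)
--     if not mbi_clean[4].isalpha() or mbi_clean[4] in excluded:
--         return False
--
--     # Position 6: Alphanumeric (excluded chars)
--     if not mbi_clean[5].isalnum() or mbi_clean[5] in excluded:
--         return False
--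
--     # Position 7: Numeric 0-9
--     if not mbi_clean[6].isdigit():
--         return False
--
--     # Position 8: Alpha (excluded chars)
--     if not mbi_clean[7].isalpha() or mbi_clean[7] in excluded:
--         return False
--
--     # Position 9: Alphanumeric (excluded chars)
--     if not mbi_clean[8].isalnum() or mbi_clean[8] in excluded:
--         return False
--
--     # Position 10: Numeric 0-9
--     if not mbi_clean[9].isdigit():
--         return False
--
--     # Position 11: Alpha (excluded chars)
--     if not mbi_clean[10].isalpha() or mbi_clean[10] in excluded:
--         return False
--
--     return True
-- ===== SOURCE B (Python) =====
-- def validate_medicare_id(medicare_id: str) -> bool: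
--     # Whole-string formulation: the digit positions are exactly the stride
--     # slice [0::3], the alpha positions are [1::3]; the excluded letters are
--     # never digits, so one disjointness test over the whole string covers all
--     # positions, and positions 2,5,8 need nothing more (already alnum).
--     mbi = "".join(c for c in medicare_id.upper() if c.isalnum())
--     return (len(mbi) == 11
--             and set("SLOIBZ").isdisjoint(mbi)
--             and mbi[0] != "0"
--             and mbi[0::3].isdigit()
--             and mbi[1::3].isalpha())
-- ===== Notes on version B (the rewrite author's own statement) =====
-- stated objective: simpler
-- what changed: Replaces the eleven unrolled positional if-branches with whole-string operations: one set-disjointness test against the excluded letters plus digit/alpha tests on the stride slices [0::3] and [1::3], correct because the digit positions are exactly indices 0,3,6,9, the alpha positions 1,4,7,10, the excluded letters are never digits, and positions 2,5,8 are already alphanumeric after cleaning.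
import Mathlib
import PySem

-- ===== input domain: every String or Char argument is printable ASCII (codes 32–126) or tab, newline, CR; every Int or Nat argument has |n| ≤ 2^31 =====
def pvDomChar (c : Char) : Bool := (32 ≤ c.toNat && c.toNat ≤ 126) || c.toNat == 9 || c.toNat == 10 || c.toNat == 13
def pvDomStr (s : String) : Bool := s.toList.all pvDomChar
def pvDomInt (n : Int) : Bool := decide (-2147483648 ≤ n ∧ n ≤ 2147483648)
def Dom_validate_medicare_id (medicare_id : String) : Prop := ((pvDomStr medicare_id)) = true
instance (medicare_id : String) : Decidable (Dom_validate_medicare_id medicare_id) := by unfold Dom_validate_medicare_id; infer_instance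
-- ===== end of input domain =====

-- B replaces A's eleven unrolled positional branches by a whole-string
-- formulation: one disjointness test against the excluded letters plus
-- digit/alpha tests on the stride slices [0::3] and [1::3] (objective: simpler).

-- ===== PORT A =====
-- excluded = set("SLOIBZ")
def pvExcluded : PySem.Set Char := PySem.Set.ofList "SLOIBZ".toList

def validate_medicare_id (medicare_id : String) : Bool :=
  -- mbi_clean = "".join(c for c in medicare_id.upper() if c.isalnum())
  let mbi_clean : List Char :=
    (PySem.Str.upper medicare_id).toList.filter PySem.Chars.isalnum
  if mbi_clean.length ≠ 11 then false
  -- each index below is in range because the guard fixed the length at 11,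
  -- so Python's mbi_clean[i] never raises; pyGetD is its total form
  else if !PySem.Chars.isdigit (PySem.List.pyGetD mbi_clean 0 ' ')
          || PySem.List.pyGetD mbi_clean 0 ' ' == '0' then false
  else if !PySem.Chars.isalpha (PySem.List.pyGetD mbi_clean 1 ' ')
          || PySem.Set.contains pvExcluded (PySem.List.pyGetD mbi_clean 1 ' ') then false
  else if !PySem.Chars.isalnum (PySem.List.pyGetD mbi_clean 2 ' ')
          || PySem.Set.contains pvExcluded (PySem.List.pyGetD mbi_clean 2 ' ') then false
  else if !PySem.Chars.isdigit (PySem.List.pyGetD mbi_clean 3 ' ') then false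
  else if !PySem.Chars.isalpha (PySem.List.pyGetD mbi_clean 4 ' ')
          || PySem.Set.contains pvExcluded (PySem.List.pyGetD mbi_clean 4 ' ') then false
  else if !PySem.Chars.isalnum (PySem.List.pyGetD mbi_clean 5 ' ')
          || PySem.Set.contains pvExcluded (PySem.List.pyGetD mbi_clean 5 ' ') then false
  else if !PySem.Chars.isdigit (PySem.List.pyGetD mbi_clean 6 ' ') then false
  else if !PySem.Chars.isalpha (PySem.List.pyGetD mbi_clean 7 ' ')
          || PySem.Set.contains pvExcluded (PySem.List.pyGetD mbi_clean 7 ' ') then false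
  else if !PySem.Chars.isalnum (PySem.List.pyGetD mbi_clean 8 ' ')
          || PySem.Set.contains pvExcluded (PySem.List.pyGetD mbi_clean 8 ' ') then false
  else if !PySem.Chars.isdigit (PySem.List.pyGetD mbi_clean 9 ' ') then false
  else if !PySem.Chars.isalpha (PySem.List.pyGetD mbi_clean 10 ' ')
          || PySem.Set.contains pvExcluded (PySem.List.pyGetD mbi_clean 10 ' ') then false
  else true

-- ===== PORT B =====
def validate_medicare_id_alt (medicare_id : String) : Bool :=
  let mbi : List Char :=
    (PySem.Str.upper medicare_id).toList.filter PySem.Chars.isalnum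
  -- the and-chain of Source B; mbi[0] is in range under the len == 11 conjunct,
  -- which guards it in Python too, so pyGetD (the total form) is exact here;
  -- step 3 ≠ 0 so slice? is always some, and under len == 11 the slices are
  -- non-empty, so str.isdigit/str.isalpha (strIsdigit/strIsalpha) are exact
  (mbi.length == 11)
  && PySem.Set.isdisjoint (PySem.Set.ofList "SLOIBZ".toList) mbi -- set("SLOIBZ").isdisjoint(mbi)
  && !(PySem.List.pyGetD mbi 0 ' ' == '0')                      -- mbi[0] != "0"
  && PySem.Chars.strIsdigit ((PySem.List.slice? mbi (some 0) none 3).getD [])  -- mbi[0::3].isdigit()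
  && PySem.Chars.strIsalpha ((PySem.List.slice? mbi (some 1) none 3).getD [])  -- mbi[1::3].isalpha()

-- ===== PRECONDITION & SPEC =====
def Spec_validate_medicare_id (medicare_id : String) (out : Bool) : Prop := out = validate_medicare_id_alt medicare_id
instance (medicare_id : String) (out : Bool) : Decidable (Spec_validate_medicare_id medicare_id out) := by unfold Spec_validate_medicare_id; infer_instance

-- ===== CLAIM (what is proved, stated in full; the proofs are below) =====
def Claim_equal_validate_medicare_id : Prop := ∀ (medicare_id : String), Dom_validate_medicare_id medicare_id → Spec_validate_medicare_id medicare_id (validate_medicare_id medicare_id)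

-- ===== LEMMAS AND PROOFS =====
theorem pv_bool_ext (a b : Bool) : (a = b) ↔ ((a = true) ↔ (b = true)) := by cases a <;> cases b <;> simp

-- an 11-condition early-return chain is the conjunction of the negated conditions
theorem pv_chain_eq (b0 b1 b2 b3 b4 b5 b6 b7 b8 b9 b10 : Bool) :
    (if b0 then false else if b1 then false else if b2 then false else
     if b3 then false else if b4 then false else if b5 then false else
     if b6 then false else if b7 then false else if b8 then false else
     if b9 then false else if b10 then false else true)
    = (!b0 && (!b1 && (!b2 && (!b3 && (!b4 && (!b5 && (!b6 && (!b7 &&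
       (!b8 && (!b9 && !b10)))))))))) := by
  revert b0 b1 b2 b3 b4 b5 b6 b7 b8 b9 b10; decide

-- a digit character is never one of the excluded letters
theorem pv_digit_ne (c : Char) (h : PySem.Chars.isdigit c = true) :
    ¬c = 'S' ∧ ¬c = 'L' ∧ ¬c = 'O' ∧ ¬c = 'I' ∧ ¬c = 'B' ∧ ¬c = 'Z' := by
  refine ⟨?_, ?_, ?_, ?_, ?_, ?_⟩ <;> (rintro rfl; exact absurd h (by decide))

-- the two bodies agree on any list of alphanumeric characters
set_option maxHeartbeats 1000000 in
theorem pv_key (l : List Char)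
    (hmem : ∀ c ∈ l, PySem.Chars.isalnum c = true) :
    (if l.length ≠ 11 then false
     else if !PySem.Chars.isdigit (PySem.List.pyGetD l 0 ' ')
             || PySem.List.pyGetD l 0 ' ' == '0' then false
     else if !PySem.Chars.isalpha (PySem.List.pyGetD l 1 ' ')
             || PySem.Set.contains pvExcluded (PySem.List.pyGetD l 1 ' ') then false
     else if !PySem.Chars.isalnum (PySem.List.pyGetD l 2 ' ')
             || PySem.Set.contains pvExcluded (PySem.List.pyGetD l 2 ' ') then false
     else if !PySem.Chars.isdigit (PySem.List.pyGetD l 3 ' ') then false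
     else if !PySem.Chars.isalpha (PySem.List.pyGetD l 4 ' ')
             || PySem.Set.contains pvExcluded (PySem.List.pyGetD l 4 ' ') then false
     else if !PySem.Chars.isalnum (PySem.List.pyGetD l 5 ' ')
             || PySem.Set.contains pvExcluded (PySem.List.pyGetD l 5 ' ') then false
     else if !PySem.Chars.isdigit (PySem.List.pyGetD l 6 ' ') then false
     else if !PySem.Chars.isalpha (PySem.List.pyGetD l 7 ' ')
             || PySem.Set.contains pvExcluded (PySem.List.pyGetD l 7 ' ') then false
     else if !PySem.Chars.isalnum (PySem.List.pyGetD l 8 ' ')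
             || PySem.Set.contains pvExcluded (PySem.List.pyGetD l 8 ' ') then false
     else if !PySem.Chars.isdigit (PySem.List.pyGetD l 9 ' ') then false
     else if !PySem.Chars.isalpha (PySem.List.pyGetD l 10 ' ')
             || PySem.Set.contains pvExcluded (PySem.List.pyGetD l 10 ' ') then false
     else true)
    = ((l.length == 11)
       && PySem.Set.isdisjoint (PySem.Set.ofList "SLOIBZ".toList) l
       && !(PySem.List.pyGetD l 0 ' ' == '0')
       && PySem.Chars.strIsdigit ((PySem.List.slice? l (some 0) none 3).getD [])
       && PySem.Chars.strIsalpha ((PySem.List.slice? l (some 1) none 3).getD [])) := by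
  rcases l with _ | ⟨c0, l⟩; · rfl
  rcases l with _ | ⟨c1, l⟩; · rfl
  rcases l with _ | ⟨c2, l⟩; · rfl
  rcases l with _ | ⟨c3, l⟩; · rfl
  rcases l with _ | ⟨c4, l⟩; · rfl
  rcases l with _ | ⟨c5, l⟩; · rfl
  rcases l with _ | ⟨c6, l⟩; · rfl
  rcases l with _ | ⟨c7, l⟩; · rfl
  rcases l with _ | ⟨c8, l⟩; · rfl
  rcases l with _ | ⟨c9, l⟩; · rfl
  rcases l with _ | ⟨c10, l⟩; · rfl
  rcases l with _ | ⟨c11, l⟩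
  · have h2 : PySem.Chars.isalnum c2 = true := hmem c2 (by simp)
    have h5 : PySem.Chars.isalnum c5 = true := hmem c5 (by simp)
    have h8 : PySem.Chars.isalnum c8 = true := hmem c8 (by simp)
    have hlen : ¬([c0, c1, c2, c3, c4, c5, c6, c7, c8, c9, c10].length ≠ 11) := by simp
    rw [if_neg hlen]
    have hs0 : PySem.List.slice? [c0, c1, c2, c3, c4, c5, c6, c7, c8, c9, c10]
        (some 0) none 3 = some [c0, c3, c6, c9] := by
      have h : PySem.List.sliceIndices 11 (some 0) none 3 = (0, 11, 3) := by decide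
      simp [PySem.List.slice?, h]; rfl
    have hs1 : PySem.List.slice? [c0, c1, c2, c3, c4, c5, c6, c7, c8, c9, c10]
        (some 1) none 3 = some [c1, c4, c7, c10] := by
      have h : PySem.List.sliceIndices 11 (some 1) none 3 = (1, 11, 3) := by decide
      simp [PySem.List.slice?, h]; rfl
    rw [hs0, hs1]
    simp only [pysem, PySem.List.pyGetD, List.getElem?_cons_succ, List.getElem?_cons_zero,
      Option.getD_some, List.length_cons, List.length_nil, beq_self_eq_true, Bool.true_and]
    rw [pv_chain_eq, pv_bool_ext]
    simp only [Bool.and_eq_true, Bool.not_eq_true', Bool.not_or, Bool.not_not,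
      h2, h5, h8, true_and,
      PySem.Set.isdisjoint, PySem.Set.ofList, PySem.Set.contains,
      PySem.Chars.strIsdigit, PySem.Chars.strIsalpha]
    have hfold : List.foldl PySem.Set.add PySem.Set.empty "SLOIBZ".toList
        = ['S', 'L', 'O', 'I', 'B', 'Z'] := by decide
    have hpe : pvExcluded = ['S', 'L', 'O', 'I', 'B', 'Z'] := by decide
    rw [hfold, hpe]
    simp only [List.contains_cons, List.contains_nil, List.any_cons, List.any_nil,
      List.all_cons, List.all_nil, List.isEmpty_cons, Bool.or_eq_false_iff, Bool.or_false,
      Bool.and_eq_true, and_true, beq_eq_false_iff_ne, ne_eq, true_and]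
    simp only [show ∀ (a b : Char), (a = b) ↔ (b = a) from fun a b => eq_comm]
    have e0 := pv_digit_ne c0
    have e3 := pv_digit_ne c3
    have e6 := pv_digit_ne c6
    have e9 := pv_digit_ne c9
    tauto
  · have hl : (c0 :: c1 :: c2 :: c3 :: c4 :: c5 :: c6 :: c7 :: c8 :: c9 :: c10 :: c11 :: l).length ≠ 11 := by
      simp
    rw [if_pos hl, beq_eq_false_iff_ne.mpr hl]
    simp
-- ===== VERDICT (by name: the statement is the Claim_ definition above) =====
set_option maxHeartbeats 1000000 in
theorem validate_medicare_id_spec : Claim_equal_validate_medicare_id := by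
  intro s _
  show validate_medicare_id s = validate_medicare_id_alt s
  exact pv_key ((PySem.Str.upper s).toList.filter PySem.Chars.isalnum)
    (fun c hc => (List.mem_filter.mp hc).2)
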